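-- pv_equiv track=rewrite | github.com/samg7b5/sidewinder | sidewinder/voicings/voicing_utilities.py | minimal_chord_distance
-- ===== SOURCE A (Python) =====
-- def minimal_chord_distance(source_chord, target_chord):
--     source_chord = [int(note) for note in source_chord]
--     target_chord = [int(note) for note in target_chord]
--     distance = 0
--     if len(source_chord) == 0: # no constraints when following a rest
--         return distance
--     for target_note in target_chord:
--         distance += min([abs(target_note - source_note) for source_note in source_chord])
--     return distance
-- ===== SOURCE B (Python) =====
-- def minimal_chord_distance(source_chord, target_chord):
--     # Sort the source notes once, then binary-search the nearest source note
--     # for each target note: O((S+T) log S) instead of A's O(S*T).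
--     src = sorted(int(note) for note in source_chord)
--     if not src:
--         return 0
--     n = len(src)
--     total = 0
--     for note in target_chord:
--         t = int(note)
--         lo, hi = 0, n
--         while lo < hi:
--             mid = (lo + hi) // 2
--             if src[mid] < t:
--                 lo = mid + 1
--             else:
--                 hi = mid
--         if lo == 0:
--             best = src[0] - t
--         elif lo == n:
--             best = t - src[n - 1]
--         else:
--             best = min(src[lo] - t, t - src[lo - 1])
--         total += best
--     return total
-- ===== Notes on version B (the rewrite author's own statement) =====
-- stated objective: faster
-- what changed: B sorts the source chord once and binary-searches the insertion point of each target note, taking the nearest of the two neighbouring source notes, instead of A's inner scan of all source notes per target note.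
import Mathlib
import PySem

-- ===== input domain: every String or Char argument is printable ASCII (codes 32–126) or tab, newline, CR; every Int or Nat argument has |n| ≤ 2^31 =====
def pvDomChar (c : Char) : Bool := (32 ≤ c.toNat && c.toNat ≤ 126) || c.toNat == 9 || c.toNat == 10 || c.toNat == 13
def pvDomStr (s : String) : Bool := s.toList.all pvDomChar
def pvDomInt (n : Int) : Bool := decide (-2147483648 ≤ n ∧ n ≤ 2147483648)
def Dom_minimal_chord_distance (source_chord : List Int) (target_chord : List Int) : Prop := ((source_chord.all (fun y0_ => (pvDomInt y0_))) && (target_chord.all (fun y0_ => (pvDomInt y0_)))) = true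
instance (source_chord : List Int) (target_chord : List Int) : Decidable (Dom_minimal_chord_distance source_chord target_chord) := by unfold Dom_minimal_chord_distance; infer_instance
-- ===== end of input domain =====

-- B sorts the source chord once and binary-searches each target note's nearest source note
-- (O((S+T) log S)) instead of A's per-target scan of all source notes; measured faster at large sizes.


-- ===== PORT A =====
-- `int(note)` is the identity on Int; `min([...])` is PySem.List.min? (the list is nonempty
-- inside the loop, so the `.getD 0` default is never taken).
def minimal_chord_distance (source_chord : List Int) (target_chord : List Int) : Int :=
  if source_chord.length = 0 then 0
  else
    target_chord.foldl
      (fun distance target_note =>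
        distance +
          (PySem.List.min? (source_chord.map (fun source_note => |target_note - source_note|))
              (fun x => x)).getD 0)
      0

-- ===== PORT B =====
-- hand-written `while lo < hi` binary search from Source B; `src[mid]` is in range (mid < hi ≤ n),
-- so `List.getD _ 0` is exact there.
def pvBisect (src : List Int) (t : Int) (lo hi : Nat) : Nat :=
  if _h : lo < hi then
    let mid := (lo + hi) / 2
    if src.getD mid 0 < t then pvBisect src t (mid + 1) hi
    else pvBisect src t lo mid
  else lo
termination_by hi - lo
decreasing_by all_goals omega

def pvNearest (src : List Int) (n : Nat) (t : Int) : Int :=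
  let lo := pvBisect src t 0 n
  if lo = 0 then src.getD 0 0 - t
  else if lo = n then t - src.getD (n - 1) 0
  else min (src.getD lo 0 - t) (t - src.getD (lo - 1) 0)

def minimal_chord_distance_alt (source_chord : List Int) (target_chord : List Int) : Int :=
  let src := PySem.List.sorted source_chord (fun x => x) false
  if src = [] then 0
  else target_chord.foldl (fun total note => total + pvNearest src src.length note) 0

-- ===== PRECONDITION & SPEC =====
def Spec_minimal_chord_distance (source_chord : List Int) (target_chord : List Int) (out : Int) : Prop := out = minimal_chord_distance_alt source_chord target_chord
instance (source_chord : List Int) (target_chord : List Int) (out : Int) : Decidable (Spec_minimal_chord_distance source_chord target_chord out) := by unfold Spec_minimal_chord_distance; infer_instance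

-- ===== CLAIM (what is proved, stated in full; the proofs are below) =====
def Claim_equal_minimal_chord_distance : Prop := ∀ (source_chord : List Int) (target_chord : List Int), Dom_minimal_chord_distance source_chord target_chord → Spec_minimal_chord_distance source_chord target_chord (minimal_chord_distance source_chord target_chord)

-- ===== LEMMAS AND PROOFS =====

-- binary-search invariant: on a ≤-sorted list, pvBisect returns the bisect_left insertion point
lemma pvBisect_spec (src : List Int) (t : Int) (hs : src.Pairwise (· ≤ ·)) :
    ∀ lo hi, lo ≤ hi → hi ≤ src.length →
      (∀ j (_ : j < src.length), j < lo → src[j] < t) →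
      (∀ j (_ : j < src.length), hi ≤ j → t ≤ src[j]) →
      lo ≤ pvBisect src t lo hi ∧ pvBisect src t lo hi ≤ hi ∧
      (∀ j (_ : j < src.length), j < pvBisect src t lo hi → src[j] < t) ∧
      (∀ j (_ : j < src.length), pvBisect src t lo hi ≤ j → t ≤ src[j]) := by
  have hmono := List.pairwise_iff_getElem.mp hs
  intro lo hi
  fun_induction pvBisect src t lo hi with
  | case1 lo hi h mid hlt ih =>
    intro _ hhi hlow hhigh
    refine ?_
    have hmid : mid < src.length := by omega
    have h1 : mid + 1 ≤ hi := by omega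
    have hgetd : src.getD mid 0 = src[mid] := List.getD_eq_getElem src 0 hmid
    have ih' := ih h1 hhi (fun j hj hjlt => by
      rcases Nat.lt_succ_iff_lt_or_eq.mp hjlt with h' | h'
      · exact lt_of_le_of_lt (hmono j mid hj hmid h') (hgetd ▸ hlt)
      · subst h'; rw [← hgetd]; exact hlt) hhigh
    exact ⟨by omega, by omega, ih'.2.2.1, ih'.2.2.2⟩
  | case2 lo hi h mid hge ih =>
    intro hlo _ hlow hhigh
    have hmid : mid < src.length := by omega
    have hgetd : src.getD mid 0 = src[mid] := List.getD_eq_getElem src 0 hmid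
    have h2 : lo ≤ mid := by omega
    have ih' := ih h2 (by omega) hlow (fun j hj hjge => by
      have : src[mid] ≤ src[j] := by
        rcases Nat.eq_or_lt_of_le hjge with h' | h'
        · simp [h']
        · exact hmono mid j hmid hj h'
      have ht : t ≤ src[mid] := by rw [← hgetd]; exact not_lt.mp hge
      exact le_trans ht this)
    exact ⟨ih'.1, by omega, ih'.2.2.1, ih'.2.2.2⟩
  | case3 lo hi h =>
    intro hlo hhi hlow hhigh
    have : lo = hi := by omega
    subst this
    exact ⟨le_refl _, le_refl _, hlow, hhigh⟩

-- per-target-note agreement: B's neighbour-of-insertion-point value equals A's min over all distances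
lemma pvNearest_eq_min (source : List Int) (t : Int) (hne : source ≠ []) :
    (PySem.List.min? (source.map (fun s => |t - s|)) (fun x => x)).getD 0 =
      pvNearest (PySem.List.sorted source (fun x => x) false)
        (PySem.List.sorted source (fun x => x) false).length t := by
  set src := PySem.List.sorted source (fun x => x) false with hsrc
  have hperm : src.Perm source := PySem.List.sorted_perm _ _ _
  have hpw : src.Pairwise (· ≤ ·) := PySem.List.sorted_pairwise source (fun x => x)
  have hmono := List.pairwise_iff_getElem.mp hpw
  have hlen : 0 < src.length := by
    have h : src ≠ [] := fun hnil => hne ((PySem.List.sorted_eq_nil_iff source (fun x => x) false).mp hnil)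
    exact List.length_pos_iff.mpr h
  obtain ⟨h0, hle, hlow, hhigh⟩ :=
    pvBisect_spec src t hpw 0 src.length (Nat.zero_le _) (le_refl _)
      (fun j hj hj0 => absurd hj0 (Nat.not_lt_zero j))
      (fun j hj hnj => absurd hj (by omega))
  set n := src.length with hn
  set lo := pvBisect src t 0 n with hlo
  have hV : pvNearest src n t =
      if lo = 0 then src.getD 0 0 - t
      else if lo = n then t - src.getD (n - 1) 0
      else min (src.getD lo 0 - t) (t - src.getD (lo - 1) 0) := rfl
  -- membership: the returned value is a distance to some source note
  have hmem : ∃ s, s ∈ src ∧ pvNearest src n t = |t - s| := by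
    rw [hV]
    by_cases e0 : lo = 0
    · refine ⟨src[0], List.getElem_mem hlen, ?_⟩
      have ht : t ≤ src[0] := hhigh 0 hlen (by omega)
      rw [if_pos e0, List.getD_eq_getElem src 0 hlen, abs_of_nonpos (by omega)]; ring
    · by_cases en : lo = n
      · have hn1 : n - 1 < n := by omega
        refine ⟨src[n-1], List.getElem_mem hn1, ?_⟩
        have ht : src[n-1] < t := hlow (n-1) hn1 (by omega)
        rw [if_neg e0, if_pos en, List.getD_eq_getElem src 0 hn1, abs_of_nonneg (by omega)]
      · have hlon : lo < n := by omega
        have hlo1 : lo - 1 < n := by omega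
        have ht1 : t ≤ src[lo] := hhigh lo hlon (le_refl _)
        have ht2 : src[lo-1] < t := hlow (lo-1) hlo1 (by omega)
        rw [if_neg e0, if_neg en, List.getD_eq_getElem src 0 hlon, List.getD_eq_getElem src 0 hlo1]
        rcases min_cases (src[lo] - t) (t - src[lo-1]) with ⟨hmin, _⟩ | ⟨hmin, _⟩
        · exact ⟨src[lo], List.getElem_mem hlon, by rw [hmin, abs_of_nonpos (by omega)]; ring⟩
        · exact ⟨src[lo-1], List.getElem_mem hlo1, by rw [hmin, abs_of_nonneg (by omega)]⟩
  -- lower bound: the returned value is ≤ every distance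
  have hlb : ∀ s ∈ src, pvNearest src n t ≤ |t - s| := by
    intro s hsmem
    obtain ⟨j, hj, rfl⟩ := List.mem_iff_getElem.mp hsmem
    rw [hV]
    by_cases hjlo : j < lo
    · -- src[j] < t, distance = t - src[j] ≥ t - src[lo-1]
      have hjt : src[j] < t := hlow j hj hjlo
      have e0 : lo ≠ 0 := by omega
      have hlo1 : lo - 1 < n := by omega
      have hjle : src[j] ≤ src[lo-1] := by
        rcases Nat.lt_or_ge j (lo-1) with h' | h'
        · exact hmono j (lo-1) hj hlo1 h'
        · have : j = lo - 1 := by omega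
          subst this; exact le_refl _
      rw [abs_of_nonneg (by omega), if_neg e0]
      by_cases en : lo = n
      · rw [if_pos en, List.getD_eq_getElem src 0 (show n-1 < n by omega)]
        have : src[n-1] = src[lo-1] := by congr 1; omega
        omega
      · rw [if_neg en, List.getD_eq_getElem src 0 (show lo-1 < n by omega)]
        have := min_le_right (src.getD lo 0 - t) (t - src[lo-1])
        omega
    · -- t ≤ src[j], distance = src[j] - t ≥ src[lo] - t
      have hjt : t ≤ src[j] := hhigh j hj (by omega)
      have hlon : lo < n := by omega
      have hjge : src[lo] ≤ src[j] := by
        rcases Nat.lt_or_ge lo j with h' | h'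
        · exact hmono lo j hlon hj h'
        · have : lo = j := by omega
          subst this; exact le_refl _
      rw [abs_of_nonpos (by omega)]
      by_cases e0 : lo = 0
      · rw [if_pos e0, List.getD_eq_getElem src 0 hlen]
        have : src[(0:Nat)] = src[lo] := by congr 1; omega
        omega
      · rw [if_neg e0, if_neg (by omega : lo ≠ n), List.getD_eq_getElem src 0 hlon]
        have := min_le_left (src[lo] - t) (t - src.getD (lo-1) 0)
        omega
  -- combine with Python's min over the unsorted distance list
  cases hm : PySem.List.min? (source.map (fun s => |t - s|)) (fun x => x) with
  | none =>
    rw [PySem.List.min?_eq_none_iff] at hm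
    exact absurd (List.map_eq_nil_iff.mp hm) hne
  | some m =>
    obtain ⟨s0, hs0, hs0e⟩ := List.mem_map.mp (PySem.List.min?_mem hm)
    obtain ⟨s, hsmem, hveq⟩ := hmem
    have h1 : pvNearest src n t ≤ m := by
      rw [← hs0e]; exact hlb s0 (hperm.mem_iff.mpr hs0)
    have h2 : m ≤ pvNearest src n t := by
      rw [hveq]
      exact PySem.List.min?_isMin hm _ (List.mem_map.mpr ⟨s, hperm.mem_iff.mp hsmem, rfl⟩)
    simp only [Option.getD_some]
    omega

-- ===== VERDICT (by name: the statement is the Claim_ definition above) =====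
theorem minimal_chord_distance_spec : Claim_equal_minimal_chord_distance := by
  intro source target _
  unfold Spec_minimal_chord_distance
  simp only [minimal_chord_distance, minimal_chord_distance_alt]
  by_cases hs : source = []
  · simp [hs, PySem.List.sorted]
  · rw [if_neg (by simpa using hs), if_neg (by simp [PySem.List.sorted_eq_nil_iff, hs])]
    exact PySem.List.foldl_congr_mem _ _ _ _ (fun acc x _ => by rw [pvNearest_eq_min source x hs])
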